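-- pv_equiv track=rewrite | github.com/MrBrantCode/unitest_baseline | mut_generate/mist_train_taco/taco_10230/solution.py | sum_of_first_n_primes
-- ===== SOURCE A (Python) =====
-- def sum_of_first_n_primes(n: int) -> int:
--     if n <= 0:
--         return 0
--
--     num = 200000
--     is_prime = [True] * (num + 1)
--     is_prime[0] = is_prime[1] = False
--
--     for i in range(2, int(num ** 0.5) + 1):
--         if not is_prime[i]:
--             continue
--         for j in range(i * 2, num + 1, i):
--             is_prime[j] = False
--
--     primes = [x for x in range(num + 1) if is_prime[x]]
--
--     return sum(primes[:n])
-- ===== SOURCE B (Python) =====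
-- def sum_of_first_n_primes(n: int) -> int:
--     # Trial division with early stop once n primes have been summed (cap 200000, like the sieve version).
--     if n <= 0:
--         return 0
--     total = 0
--     count = 0
--     for c in range(2, 200001):
--         d = 2
--         prime = True
--         while d * d <= c:
--             if c % d == 0:
--                 prime = False
--                 break
--             d += 1
--         if prime:
--             total += c
--             count += 1
--             if count == n:
--                 break
--     return total
-- ===== Notes on version B (the rewrite author's own statement) =====
-- stated objective: alternative
-- what changed: Replaces the full Eratosthenes sieve over 0..200000 plus list slicing by an incremental trial-division scan that accumulates a running sum and stops as soon as n primes have been added.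
import Mathlib
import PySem

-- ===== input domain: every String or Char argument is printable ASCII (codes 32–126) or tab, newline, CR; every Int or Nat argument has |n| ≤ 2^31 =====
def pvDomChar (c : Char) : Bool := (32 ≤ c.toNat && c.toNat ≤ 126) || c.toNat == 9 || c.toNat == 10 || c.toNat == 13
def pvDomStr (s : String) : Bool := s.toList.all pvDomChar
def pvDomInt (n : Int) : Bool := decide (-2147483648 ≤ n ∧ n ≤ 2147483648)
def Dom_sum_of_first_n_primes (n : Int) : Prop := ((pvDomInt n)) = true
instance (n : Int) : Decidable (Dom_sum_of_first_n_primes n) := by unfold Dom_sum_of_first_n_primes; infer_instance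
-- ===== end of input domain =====

-- B replaces A's full Eratosthenes sieve + slice by a trial-division scan with an early break once n primes are summed; alternative structure, not claimed faster.

-- ===== PORT A =====
-- inner loop `for j in range(i*2, 200001, i): is_prime[j] = False`;
-- range(i*2, 200001, i) has exactly 200000/i - 1 elements i*2, i*3, …, (200000/i)*i, in this order;
-- the Python list of booleans is an Array Bool (every index written is in bounds)
def pvMark (i : Nat) (b : Array Bool) : Array Bool :=
  (List.range' (2 * i) (200000 / i - 1) i).foldl (fun b j => b.setIfInBounds j false) b

-- one iteration of `for i in range(2, int(num**0.5)+1)`: `if not is_prime[i]: continue`, else mark;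
-- the in-range index read is_prime[i] is ported as getD i false
def pvStep (b : Array Bool) (i : Nat) : Array Bool :=
  if !(b.getD i false) then b else pvMark i b

-- is_prime after the whole sieve: int(200000 ** 0.5) = 447 exactly, so the outer loop is range(2, 448)
def pvSieve : Array Bool :=
  (List.range' 2 446).foldl pvStep
    (((Array.replicate 200001 true).setIfInBounds 0 false).setIfInBounds 1 false)

def sum_of_first_n_primes (n : Int) : Int :=
  if n ≤ 0 then 0
  else
    -- primes = [x for x in range(200001) if is_prime[x]]; primes[:n] with n ≥ 1 is take n.toNat
    let primes := (List.range 200001).filter (fun x => pvSieve.getD x false)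
    ((primes.take n.toNat).map (fun x => (x : Int))).sum

-- ===== PORT B =====
-- `while d * d <= c: if c % d == 0: prime = False; break; d += 1`
def pvTd (c d : Nat) : Bool :=
  if d * d ≤ c then (if c % d == 0 then false else pvTd c (d + 1)) else true
termination_by c + 1 - d
decreasing_by
  rename_i h
  rcases Nat.eq_zero_or_pos d with h0 | h0
  · omega
  · have : d ≤ d * d := Nat.le_mul_of_pos_left d h0
    omega

-- `for c in range(2, 200001)` with running total/count and `break` once count == n
def pvLoop (c : Nat) (total : Int) (count : Int) (n : Int) : Int :=
  if c ≤ 200000 then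
    if pvTd c 2 then
      if count + 1 == n then total + c
      else pvLoop (c + 1) (total + c) (count + 1) n
    else pvLoop (c + 1) total count n
  else total
termination_by 200001 - c

def sum_of_first_n_primes_alt (n : Int) : Int :=
  if n ≤ 0 then 0 else pvLoop 2 0 0 n

-- ===== PRECONDITION & SPEC =====
def Spec_sum_of_first_n_primes (n : Int) (out : Int) : Prop := out = sum_of_first_n_primes_alt n
instance (n : Int) (out : Int) : Decidable (Spec_sum_of_first_n_primes n out) := by unfold Spec_sum_of_first_n_primes; infer_instance

-- ===== CLAIM (what is proved, stated in full; the proofs are below) =====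
def Claim_equal_sum_of_first_n_primes : Prop := ∀ (n : Int), Dom_sum_of_first_n_primes n → Spec_sum_of_first_n_primes n (sum_of_first_n_primes n)

-- ===== LEMMAS AND PROOFS =====

-- the integer sum of a list of naturals
def pvSumInt (l : List Nat) : Int := (l.map (fun x => (x : Int))).sum

-- primes in [c, 200000], by mathematical primality
def pvPrimesFrom (c : Nat) : List Nat :=
  (List.range' c (200001 - c)).filter (fun x => decide (Nat.Prime x))

-- "x survives the sieve after all i ≤ k have been processed"
def pvGood (k x : Nat) : Prop := 2 ≤ x ∧ ∀ p, Nat.Prime p → p ≤ k → p ∣ x → x = p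

def pvInv (k : Nat) (b : List Bool) : Prop :=
  b.length = 200001 ∧ ∀ x, x ≤ 200000 → (b.getD x false = true ↔ pvGood k x)

-- list-level twins of the Array-based sieve, used only by the proofs
def pvMarkL (i : Nat) (b : List Bool) : List Bool :=
  (List.range' (2 * i) (200000 / i - 1) i).foldl (fun b j => b.set j false) b
def pvStepL (b : List Bool) (i : Nat) : List Bool :=
  if !(b.getD i false) then b else pvMarkL i b
def pvSieveL : List Bool :=
  (List.range' 2 446).foldl pvStepL (((List.replicate 200001 true).set 0 false).set 1 false)

theorem arr_getD (a : Array Bool) (i : Nat) (d : Bool) : a.getD i d = a.toList.getD i d := by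
  rcases a with ⟨l⟩
  simp [Array.getD, List.getD, Array.getInternal]
  split_ifs with h
  · simp [List.getElem?_eq_getElem h]
  · simp [List.getElem?_eq_none (by omega : l.length ≤ i)]

theorem mark_toList (i : Nat) (b : Array Bool) : (pvMark i b).toList = pvMarkL i b.toList := by
  unfold pvMark pvMarkL
  generalize List.range' (2 * i) (200000 / i - 1) i = l
  induction l generalizing b with
  | nil => rfl
  | cons j t ih => rw [List.foldl_cons, List.foldl_cons, ih, Array.toList_setIfInBounds]

theorem step_toList (b : Array Bool) (i : Nat) : (pvStep b i).toList = pvStepL b.toList i := by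
  unfold pvStep pvStepL
  rw [arr_getD]
  split_ifs with h
  · rfl
  · exact mark_toList i b

theorem sieve_toList : pvSieve.toList = pvSieveL := by
  unfold pvSieve pvSieveL
  have init : (((Array.replicate 200001 true).setIfInBounds 0 false).setIfInBounds 1 false).toList
      = ((List.replicate 200001 true).set 0 false).set 1 false := by
    rw [Array.toList_setIfInBounds, Array.toList_setIfInBounds, Array.toList_replicate]
  rw [← init]
  generalize ((Array.replicate 200001 true).setIfInBounds 0 false).setIfInBounds 1 false = a
  generalize List.range' 2 446 = l
  induction l generalizing a with
  | nil => rfl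
  | cons j t ih => rw [List.foldl_cons, List.foldl_cons, ← step_toList, ih]

theorem getD_set (b : List Bool) (j x : Nat) (v : Bool) :
    (b.set j v).getD x false = if j = x ∧ j < b.length then v else b.getD x false := by
  rcases Nat.lt_or_ge x b.length with hx | hx
  · rw [List.getD_eq_getElem _ _ (by simpa using hx), List.getElem_set,
      List.getD_eq_getElem _ _ hx]
    split_ifs with h1 h2 h2 <;> simp_all <;> omega
  · rw [List.getD_eq_default _ _ (by simpa using hx), List.getD_eq_default _ _ hx]
    split_ifs with h1
    · omega
    · rfl

theorem foldl_set_len (l : List Nat) (b : List Bool) :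
    (l.foldl (fun b j => b.set j false) b).length = b.length := by
  induction l generalizing b with
  | nil => rfl
  | cons j t ih => simp [List.foldl_cons, ih]

theorem foldl_set_getD (l : List Nat) (b : List Bool) (x : Nat)
    (hl : ∀ j ∈ l, j < b.length) :
    (l.foldl (fun b j => b.set j false) b).getD x false =
      if x ∈ l then false else b.getD x false := by
  induction l generalizing b with
  | nil => simp
  | cons j t ih =>
    rw [List.foldl_cons, ih _ (by intro a ha; simpa using hl a (List.mem_cons_of_mem _ ha))]
    rw [getD_set]
    have hj : j < b.length := hl j List.mem_cons_self
    by_cases hxt : x ∈ t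
    · simp [hxt]
    · by_cases hjx : j = x
      · subst hjx
        rw [if_neg hxt, if_pos ⟨rfl, hj⟩, if_pos List.mem_cons_self]
      · rw [if_neg hxt, if_neg (by tauto), if_neg (by simp [List.mem_cons, hxt]; tauto)]

theorem mem_markRange (i x : Nat) (hi : 2 ≤ i) :
    x ∈ List.range' (2 * i) (200000 / i - 1) i ↔ (i ∣ x ∧ 2 * i ≤ x ∧ x ≤ 200000) := by
  rw [List.mem_range']
  constructor
  · rintro ⟨m, hm, rfl⟩
    refine ⟨⟨m + 2, by ring⟩, by omega, ?_⟩
    have h2 : m + 2 ≤ 200000 / i := by omega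
    calc 2 * i + i * m = i * (m + 2) := by ring
      _ ≤ i * (200000 / i) := Nat.mul_le_mul_left i h2
      _ ≤ 200000 := Nat.mul_div_le 200000 i
  · rintro ⟨⟨q, rfl⟩, h2i, hle⟩
    have hq2 : 2 ≤ q := by
      have h1 : i * 2 ≤ i * q := by omega
      exact Nat.le_of_mul_le_mul_left h1 (by omega)
    have hqd : q ≤ 200000 / i := (Nat.le_div_iff_mul_le (by omega)).mpr (by rw [Nat.mul_comm]; exact hle)
    refine ⟨q - 2, by omega, ?_⟩
    obtain ⟨k, rfl⟩ := Nat.exists_eq_add_of_le hq2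
    have hk : 2 + k - 2 = k := by omega
    rw [hk]; ring

theorem mark_getD (i x : Nat) (b : List Bool) (hlen : b.length = 200001)
    (hx : x ≤ 200000) (hi : 2 ≤ i) :
    (pvMarkL i b).getD x false =
      (b.getD x false && !(decide (i ∣ x ∧ 2 * i ≤ x))) := by
  unfold pvMarkL
  rw [foldl_set_getD]
  · by_cases hm : x ∈ List.range' (2 * i) (200000 / i - 1) i
    · rw [if_pos hm]
      rw [mem_markRange i x hi] at hm
      simp [hm.1, hm.2.1]
    · rw [if_neg hm]
      rw [mem_markRange i x hi] at hm
      by_cases h1 : i ∣ x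
      · by_cases h2 : 2 * i ≤ x
        · exact absurd ⟨h1, h2, hx⟩ hm
        · simp [h1, h2]
      · simp [h1]
  · intro j hj
    rw [mem_markRange i j hi] at hj
    omega

theorem mark_len (i : Nat) (b : List Bool) : (pvMarkL i b).length = b.length :=
  foldl_set_len _ b

theorem step_inv (i : Nat) (b : List Bool) (hi : 2 ≤ i) (hub : i ≤ 200000) (hinv : pvInv (i - 1) b) :
    pvInv i (pvStepL b i) := by
  obtain ⟨hlen, hiff⟩ := hinv
  by_cases hp : Nat.Prime i
  · -- i survives so far, so we mark its multiples
    have hbi : b.getD i false = true := by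
      rw [hiff i hub]   -- need i ≤ 200000
      exact ⟨hp.two_le, fun p hpp hple hpd => by
        rcases (Nat.prime_dvd_prime_iff_eq hpp hp).mp hpd with rfl; rfl⟩
    rw [pvStepL, hbi]
    simp only [Bool.not_true, Bool.false_eq_true, if_false]
    constructor
    · rw [mark_len]; exact hlen
    · intro x hx
      rw [mark_getD i x b hlen hx hi]
      constructor
      · intro h
        rw [Bool.and_eq_true] at h
        have h1 : b.getD x false = true := h.1
        have h2 : ¬ (i ∣ x ∧ 2 * i ≤ x) := by
          rintro ⟨hd, hge⟩
          have h' := h.2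
          simp [hd] at h'
          omega
        obtain ⟨hx2, hall⟩ := (hiff x hx).mp h1
        refine ⟨hx2, fun p hpp hple hpd => ?_⟩
        rcases Nat.eq_or_lt_of_le hple with rfl | hlt
        · -- p = i
          by_contra hne
          obtain ⟨q, rfl⟩ := hpd
          have hq : 2 ≤ q := by
            rcases Nat.lt_or_ge q 2 with hq | hq
            · interval_cases q <;> simp_all <;> omega
            · exact hq
          exact h2 ⟨Dvd.intro q rfl, by nlinarith⟩
        · exact hall p hpp (by omega) hpd
      · rintro ⟨hx2, hall⟩
        have hb : b.getD x false = true :=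
          (hiff x hx).mpr ⟨hx2, fun p hpp hple hpd => hall p hpp (by omega) hpd⟩
        rw [hb]
        have : ¬ (i ∣ x ∧ 2 * i ≤ x) := by
          rintro ⟨hd, hle2⟩
          have := hall i hp le_rfl hd
          omega
        simp [this]
  · -- i is composite (or <2, impossible): b[i] is already false, step is a no-op
    have hbi : b.getD i false = false := by
      obtain ⟨p, hpp, hpd⟩ := Nat.exists_prime_and_dvd (show i ≠ 1 by omega)
      have hpi : p < i := by
        rcases Nat.eq_or_lt_of_le (Nat.le_of_dvd (by omega) hpd) with rfl | h
        · exact absurd hpp hp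
        · exact h
      cases hb : b.getD i false
      · rfl
      · exfalso
        obtain ⟨-, hall⟩ := (hiff i hub).mp hb
        have := hall p hpp (by omega) hpd
        omega
    rw [pvStepL, hbi]
    simp only [Bool.not_false, if_true]
    refine ⟨hlen, fun x hx => ?_⟩
    rw [hiff x hx]
    unfold pvGood
    constructor
    · rintro ⟨hx2, hall⟩
      refine ⟨hx2, fun p hpp hple hpd => ?_⟩
      rcases Nat.eq_or_lt_of_le hple with rfl | hlt
      · exact absurd hpp hp
      · exact hall p hpp (by omega) hpd
    · rintro ⟨hx2, hall⟩
      exact ⟨hx2, fun p hpp hple hpd => hall p hpp (by omega) hpd⟩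

theorem init_inv : pvInv 1 (((List.replicate 200001 true).set 0 false).set 1 false) := by
  have hl1 : ((List.replicate 200001 true).set 0 false).length = 200001 := by
    rw [List.length_set, List.length_replicate]
  have hl0 : (List.replicate 200001 (true : Bool)).length = 200001 := List.length_replicate
  constructor
  · rw [List.length_set, hl1]
  · intro x hx
    rw [getD_set, getD_set, hl1, hl0]
    by_cases h1 : x = 0
    · subst h1
      rw [if_neg (by omega), if_pos ⟨rfl, by omega⟩]
      constructor
      · intro h; exact absurd h (by simp)
      · rintro ⟨hx2, -⟩; omega
    · by_cases h2 : x = 1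
      · subst h2
        rw [if_pos ⟨rfl, by omega⟩]
        constructor
        · intro h; exact absurd h (by simp)
        · rintro ⟨hx2, -⟩; omega
      · rw [if_neg (by omega), if_neg (by omega)]
        rw [List.getD_replicate true (by omega)]
        constructor
        · intro _
          exact ⟨by omega, fun p hpp hple hpd => by have := hpp.two_le; omega⟩
        · intro _; rfl

theorem fold_inv (m : Nat) : ∀ (k : Nat) (b : List Bool), 1 ≤ k → k + m ≤ 200000 →
    pvInv k b → pvInv (k + m) ((List.range' (k + 1) m).foldl pvStepL b) := by
  induction m with
  | zero => intro k b _ _ h; simpa using h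
  | succ m ih =>
    intro k b hk hub h
    rw [List.range'_succ, List.foldl_cons]
    have h1 : pvInv (k + 1) (pvStepL b (k + 1)) :=
      step_inv (k + 1) b (by omega) (by omega) (by simpa using h)
    have := ih (k + 1) (pvStepL b (k + 1)) (by omega) (by omega) h1
    have harith : k + 1 + m = k + (m + 1) := by omega
    rwa [harith] at this

theorem sieve_inv : pvInv 447 pvSieveL := by
  have h := fold_inv 446 1 (((List.replicate 200001 true).set 0 false).set 1 false)
    (by omega) (by omega) init_inv
  have e1 : (1 : Nat) + 446 = 447 := by norm_num
  have e2 : (1 : Nat) + 1 = 2 := by norm_num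
  rw [e1, e2] at h
  unfold pvSieveL
  exact h

theorem good_iff_prime (x : Nat) (hx : x ≤ 200000) : pvGood 447 x ↔ Nat.Prime x := by
  constructor
  · rintro ⟨hx2, hall⟩
    by_contra hnp
    have hpf : Nat.Prime x.minFac := Nat.minFac_prime (by omega)
    have hdvd : x.minFac ∣ x := Nat.minFac_dvd x
    have hsq : x.minFac * x.minFac ≤ x := by
      have := Nat.minFac_sq_le_self (by omega) hnp
      nlinarith [this]
    have hle : x.minFac ≤ 447 := by nlinarith
    have := hall x.minFac hpf hle hdvd
    exact hnp (by rw [this]; exact hpf)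
  · intro hp
    refine ⟨hp.two_le, fun p hpp hple hpd => ?_⟩
    exact ((Nat.prime_dvd_prime_iff_eq hpp hp).mp hpd).symm

theorem sieveL_prime (x : Nat) (hx : x ≤ 200000) :
    pvSieveL.getD x false = decide (Nat.Prime x) := by
  rw [Bool.eq_iff_iff, decide_eq_true_iff, (sieve_inv.2 x hx), good_iff_prime x hx]

theorem sieve_prime (x : Nat) (hx : x ≤ 200000) :
    pvSieve.getD x false = decide (Nat.Prime x) := by
  rw [arr_getD, sieve_toList]
  exact sieveL_prime x hx

theorem td_iff (c d : Nat) :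
    pvTd c d = true ↔ ∀ e, d ≤ e → e * e ≤ c → ¬ e ∣ c := by
  induction d using pvTd.induct c with
  | case1 d hle hmod =>
    rw [pvTd]
    simp only [hle, if_true, hmod, if_true]
    constructor
    · intro h; exact absurd h (by simp)
    · intro h
      exact (h d le_rfl hle (Nat.dvd_of_mod_eq_zero (by simpa using hmod))).elim
  | case2 d hle hmod ih =>
    rw [pvTd]
    simp only [hle, hmod, if_true, Bool.false_eq_true, if_false]
    rw [ih]
    constructor
    · intro h e he hee hdvd
      rcases Nat.eq_or_lt_of_le he with rfl | hlt
      · obtain ⟨k, rfl⟩ := hdvd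
        simp [Nat.mul_mod_right] at hmod
      · exact h e hlt hee hdvd
    · intro h e he hee hdvd; exact h e (by omega) hee hdvd
  | case3 d hle =>
    rw [pvTd]
    simp only [hle, if_false]
    constructor
    · intro _ e he hee hdvd
      have : d * d ≤ e * e := Nat.mul_le_mul he he
      omega
    · intro _; trivial

theorem td_prime (c : Nat) (hc : 2 ≤ c) : pvTd c 2 = decide (Nat.Prime c) := by
  rw [Bool.eq_iff_iff, td_iff, decide_eq_true_iff]
  rw [Nat.prime_def_le_sqrt]
  constructor
  · intro h
    exact ⟨hc, fun m hm hms => h m hm (Nat.le_sqrt.mp hms)⟩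
  · rintro ⟨-, h⟩ e he hee
    exact h e he (Nat.le_sqrt.mpr hee)

theorem primesFrom_cons (c : Nat) (hc : c ≤ 200000) :
    pvPrimesFrom c = if Nat.Prime c then c :: pvPrimesFrom (c+1) else pvPrimesFrom (c+1) := by
  unfold pvPrimesFrom
  have h1 : 200001 - c = (200001 - (c+1)) + 1 := by omega
  rw [h1, List.range'_succ, List.filter_cons]
  by_cases hp : Nat.Prime c <;> simp [hp]

theorem loop_eq (c : Nat) (total count n : Int) (hc2 : 2 ≤ c) (h : count < n) :
    pvLoop c total count n = total + pvSumInt ((pvPrimesFrom c).take (n - count).toNat) := by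
  revert hc2 h
  induction c, total, count using pvLoop.induct n with
  | case1 c total count hc hp heq =>
    intro hc2 h
    rw [pvLoop]
    simp only [hc, if_true, hp, heq, if_true]
    have hprime : Nat.Prime c := by
      have := td_prime c hc2; rw [this] at hp; exact of_decide_eq_true hp
    rw [primesFrom_cons c hc, if_pos hprime]
    have heq' : count + 1 = n := by simpa using heq
    have : (n - count).toNat = 1 := by omega
    rw [this]
    simp [pvSumInt]
  | case2 c total count hc hp heq ih =>
    intro hc2 h
    rw [pvLoop]
    simp only [hc, if_true, hp, heq]
    have heq' : ¬ (count + 1 = n) := by simpa using heq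
    have hlt : count + 1 < n := by omega
    rw [ih (by omega) hlt]
    have hprime : Nat.Prime c := by
      have := td_prime c hc2; rw [this] at hp; exact of_decide_eq_true hp
    rw [primesFrom_cons c hc, if_pos hprime]
    have : (n - count).toNat = (n - (count+1)).toNat + 1 := by omega
    rw [this, List.take_succ_cons]
    simp [pvSumInt]; ring
  | case3 c total count hc hp ih =>
    intro hc2 h
    rw [pvLoop, if_pos hc, if_neg hp, ih (by omega) h]
    have hnp : ¬ Nat.Prime c := by
      intro hpr
      rw [td_prime c hc2] at hp; simp [hpr] at hp
    rw [primesFrom_cons c hc, if_neg hnp]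
  | case4 c total count hc =>
    intro hc2 h
    rw [pvLoop]
    simp only [hc, if_false]
    have : 200001 - c = 0 := by omega
    simp [pvPrimesFrom, this, pvSumInt]

-- ===== VERDICT (by name: the statement is the Claim_ definition above) =====
theorem sum_of_first_n_primes_spec : Claim_equal_sum_of_first_n_primes := by
  intro n _
  unfold Spec_sum_of_first_n_primes sum_of_first_n_primes sum_of_first_n_primes_alt
  by_cases hn : n ≤ 0
  · rw [if_pos hn, if_pos hn]
  · rw [if_neg hn, if_neg hn]
    have hfilter : (List.range 200001).filter (fun x => pvSieve.getD x false)
        = (List.range 200001).filter (fun x => decide (Nat.Prime x)) := by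
      apply List.filter_congr
      intro x hxm
      have hx : x ≤ 200000 := by
        have := List.mem_range.mp hxm; omega
      exact sieve_prime x hx
    have hrange : (List.range 200001).filter (fun x => decide (Nat.Prime x)) = pvPrimesFrom 2 := by
      rw [List.range_eq_range']
      rw [show (200001 : Nat) = 200000 + 1 by norm_num, List.range'_succ]
      rw [show (200000 : Nat) = 199999 + 1 by norm_num, List.range'_succ]
      rw [List.filter_cons, List.filter_cons]
      rw [if_neg (by simp [Nat.not_prime_zero]), if_neg (by simp [Nat.not_prime_one])]
      unfold pvPrimesFrom
      norm_num
    rw [hfilter, hrange]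
    rw [loop_eq 2 0 0 n (by omega) (by omega)]
    rw [show n - 0 = n from by ring]
    rw [zero_add]
    rfl
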